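-- pv_equiv track=rewrite | github.com/edineibauer/rico-aos-poucos | scripts/fundosnet/validate.py | paths_protegidos_tocados
-- ===== SOURCE A (Python) =====
-- PROTEGIDOS = {
--     "meta.ticker",
--     "meta.nome",
--     "seo.title",
--     "seo.description",
--     "seo.canonical",
-- }
--
-- def paths_protegidos_tocados(patch_paths: list[str]) -> list[str]:
--     """Retorna subset dos paths que NÃO podem ser tocados pela IA."""
--     violados = []
--     for p in patch_paths:
--         for prot in PROTEGIDOS:
--             if p == prot or p.startswith(prot + "."):
--                 violados.append(p)
--                 break
--     return violados
-- ===== SOURCE B (Python) =====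
-- PROTEGIDOS = {
--     "meta.ticker",
--     "meta.nome",
--     "seo.title",
--     "seo.description",
--     "seo.canonical",
-- }
--
-- def paths_protegidos_tocados(patch_paths: list[str]) -> list[str]:
--     """Retorna subset dos paths que NÃO podem ser tocados pela IA."""
--     violados = []
--     for p in patch_paths:
--         # dot-boundary prefixes of p (one per '.') plus p itself
--         prefixes = [p[:i] for i, ch in enumerate(p) if ch == "."]
--         prefixes.append(p)
--         if any(q in PROTEGIDOS for q in prefixes):
--             violados.append(p)
--     return violados
-- ===== Notes on version B (the rewrite author's own statement) =====
-- stated objective: alternative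
-- what changed: B enumerates each path's own dot-boundary prefixes (one per '.' plus the path itself) and tests each against the PROTEGIDOS set, instead of A's scan over all five protected prefixes with equality/startswith per path.
import Mathlib
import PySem

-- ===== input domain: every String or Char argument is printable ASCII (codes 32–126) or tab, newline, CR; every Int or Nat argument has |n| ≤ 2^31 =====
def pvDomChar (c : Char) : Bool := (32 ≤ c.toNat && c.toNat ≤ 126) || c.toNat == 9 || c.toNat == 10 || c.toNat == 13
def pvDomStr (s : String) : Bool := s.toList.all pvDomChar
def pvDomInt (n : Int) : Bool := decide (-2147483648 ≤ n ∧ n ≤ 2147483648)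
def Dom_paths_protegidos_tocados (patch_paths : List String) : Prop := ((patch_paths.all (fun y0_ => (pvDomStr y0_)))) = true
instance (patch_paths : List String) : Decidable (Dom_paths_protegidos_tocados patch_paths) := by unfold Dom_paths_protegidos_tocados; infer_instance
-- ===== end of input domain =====

-- B replaces A's scan of all five protected prefixes (startswith each) per path by enumerating
-- the path's own dot-boundary prefixes and testing each against the protected set (alternative,
-- not claimed faster). A iterates over a Python set, but each path is appended at most once
-- (break on first hit), so A's result does not depend on the set's iteration order.

-- ===== PORT A =====
def pvProts : List String :=
  ["meta.ticker", "meta.nome", "seo.title", "seo.description", "seo.canonical"]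

-- inner 'for prot in PROTEGIDOS: … break' — true as soon as one protected prefix matches
def pvInnerA (p : String) : List String → Bool
  | [] => false
  | prot :: rest =>
      if p == prot || PySem.Str.startswith p (prot ++ ".") then true else pvInnerA p rest

def paths_protegidos_tocados (patch_paths : List String) : List String :=
  patch_paths.foldl (fun violados p => if pvInnerA p pvProts then violados ++ [p] else violados) []

-- ===== PORT B =====
def pvProtSet : PySem.Set String :=
  PySem.Set.ofList ["meta.ticker", "meta.nome", "seo.title", "seo.description", "seo.canonical"]

-- [p[:i] for i, ch in enumerate(p) if ch == "."] ++ [p]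
def pvPrefixes (p : String) : List String :=
  (((PySem.List.enumerate p.toList).filter (fun ic => ic.2 == '.')).map
      (fun ic => PySem.Str.slice p none (some ic.1))) ++ [p]

def paths_protegidos_tocados_alt (patch_paths : List String) : List String :=
  patch_paths.foldl (fun violados p =>
    if (pvPrefixes p).any (fun q => PySem.Set.contains pvProtSet q) then violados ++ [p]
    else violados) []

-- ===== PRECONDITION & SPEC =====
def Spec_paths_protegidos_tocados (patch_paths : List String) (out : List String) : Prop := out = paths_protegidos_tocados_alt patch_paths
instance (patch_paths : List String) (out : List String) : Decidable (Spec_paths_protegidos_tocados patch_paths out) := by unfold Spec_paths_protegidos_tocados; infer_instance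

-- ===== CLAIM (what is proved, stated in full; the proofs are below) =====
def Claim_equal_paths_protegidos_tocados : Prop := ∀ (patch_paths : List String), Dom_paths_protegidos_tocados patch_paths → Spec_paths_protegidos_tocados patch_paths (paths_protegidos_tocados patch_paths)

-- ===== LEMMAS AND PROOFS =====

-- A's inner loop is an 'any' over the protected list
theorem pvInnerA_eq_any (p : String) (l : List String) :
    pvInnerA p l = l.any (fun prot => p == prot || PySem.Str.startswith p (prot ++ ".")) := by
  induction l with
  | nil => rfl
  | cons hd t ih =>
      unfold pvInnerA
      rw [List.any_cons, ← ih]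
      cases hc : (p == hd || PySem.Str.startswith p (hd ++ ".")) with
      | false => simp
      | true => simp

-- B's prefix list contains exactly p itself and the strings q with q ++ "." a prefix of p
theorem mem_pvPrefixes (p q : String) :
    q ∈ pvPrefixes p ↔ q = p ∨ (q.toList ++ ['.']) <+: p.toList := by
  unfold pvPrefixes
  simp only [List.mem_append, List.mem_map, List.mem_filter,
    PySem.List.mem_enumerate_iff, List.mem_singleton, beq_iff_eq]
  constructor
  · rintro (⟨⟨i, c⟩, ⟨⟨k, hk, hik⟩, hdot⟩, rfl⟩ | rfl)
    · right
      obtain ⟨rfl, rfl⟩ := Prod.mk.injEq .. ▸ hik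
      simp only at hdot
      have hs : (PySem.Str.slice p none (some ((0 : Int) + k))).toList = p.toList.take k := by
        rw [PySem.Str.toList_slice, PySem.Chars.slice_eq_listSlice,
          PySem.List.slice_to _ (by omega)]
        norm_num
      have hsplit : p.toList = p.toList.take k ++ '.' :: p.toList.drop (k + 1) := by
        conv_lhs => rw [← List.take_append_drop k p.toList,
          List.drop_eq_getElem_cons hk, hdot]
      refine ⟨p.toList.drop (k + 1), ?_⟩
      rw [hs]
      conv_rhs => rw [hsplit]
      simp
    · exact Or.inl rfl
  · rintro (rfl | ⟨r, hr⟩)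
    · right; rfl
    · left
      have hlen : p.toList.length = q.toList.length + 1 + r.length := by
        rw [← hr]
        simp only [List.length_append, List.length_cons, List.length_nil]
      have hget : p.toList[q.toList.length]'(by omega) = '.' := by
        rw [List.getElem_of_eq hr.symm, List.getElem_append_left (by simp),
          List.getElem_append_right (le_refl _)]
        simp
      refine ⟨((q.toList.length : Int), '.'), ⟨⟨q.toList.length, by omega, ?_⟩, rfl⟩, ?_⟩
      · simpa using hget.symm
      · rw [← String.toList_inj]
        rw [PySem.Str.toList_slice, PySem.Chars.slice_eq_listSlice,
          PySem.List.slice_to _ (by positivity), ← hr]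
        norm_num [List.take_left]

-- the two per-path tests agree
theorem pvCond_eq (p : String) :
    pvInnerA p pvProts = (pvPrefixes p).any (fun q => PySem.Set.contains pvProtSet q) := by
  have hset : pvProtSet = pvProts := by rfl
  rw [pvInnerA_eq_any, Bool.eq_iff_iff]
  simp only [List.any_eq_true, Bool.or_eq_true, beq_iff_eq, hset,
    PySem.Set.contains, List.contains_iff_mem, mem_pvPrefixes]
  constructor
  · rintro ⟨prot, hm, h⟩
    refine ⟨prot, ?_, hm⟩
    rcases h with h | h
    · exact Or.inl h.symm
    · exact Or.inr ((PySem.Chars.startswith_iff _ _).mp (by simpa using h))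
  · rintro ⟨q, h, hm⟩
    refine ⟨q, hm, ?_⟩
    rcases h with h | h
    · exact Or.inl h.symm
    · exact Or.inr (by simpa using (PySem.Chars.startswith_iff p.toList (q.toList ++ ['.'])).mpr h)

-- ===== VERDICT (by name: the statement is the Claim_ definition above) =====
theorem paths_protegidos_tocados_spec : Claim_equal_paths_protegidos_tocados := by
  intro patch_paths _
  unfold Spec_paths_protegidos_tocados paths_protegidos_tocados paths_protegidos_tocados_alt
  simp only [pvCond_eq]
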